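-- pv_equiv track=rewrite | github.com/dev-bsh/TIL | 알고리즘/문자열/boj_공통부분문자열.py | checkSubString
-- ===== SOURCE A (Python) =====
-- def checkSubString(right, left):
--     answer = 0
--     count = 0
--     for i in range(len(right)):
--         if right[i] == left[i]:
--             count += 1
--             answer = max(answer, count)
--         else:
--             count = 0
--     return answer
-- ===== SOURCE B (Python) =====
-- def checkSubString(right, left):
--     # build the per-position equality table, then find the longest run of True
--     matches = [right[i] == left[i] for i in range(len(right))]
--     n = len(matches)
--     best = 0
--     i = 0
--     while i < n:
--         if matches[i]:
--             j = i
--             while j < n and matches[j]: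
--                 j += 1
--             if j - i > best:
--                 best = j - i
--             i = j
--         else:
--             i += 1
--     return best
-- ===== Notes on version B (the rewrite author's own statement) =====
-- stated objective: alternative
-- what changed: Replaces the running-counter-with-running-max single loop by a build-equality-table-then-scan-runs decomposition: an outer scan finds each run start and an inner two-pointer scan measures the whole run at once.
import Mathlib
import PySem

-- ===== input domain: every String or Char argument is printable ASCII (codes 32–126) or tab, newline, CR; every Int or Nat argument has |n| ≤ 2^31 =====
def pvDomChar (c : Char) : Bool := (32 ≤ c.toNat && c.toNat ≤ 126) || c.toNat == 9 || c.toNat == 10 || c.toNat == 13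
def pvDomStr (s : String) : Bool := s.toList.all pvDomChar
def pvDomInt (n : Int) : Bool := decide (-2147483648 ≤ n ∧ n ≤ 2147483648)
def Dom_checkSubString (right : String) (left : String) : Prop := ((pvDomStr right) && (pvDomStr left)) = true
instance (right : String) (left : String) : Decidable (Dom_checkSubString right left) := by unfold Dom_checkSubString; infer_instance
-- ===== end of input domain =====

-- B changes the decomposition only (equality table + run scan); the return value is proved identical. No side effects in either version.

-- ===== PORT A =====
-- A's single loop: state (answer, count), 'count += 1; answer = max(answer, count)' on a match, 'count = 0' otherwise.
def checkSubString (right : String) (left : String) : Int :=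
  ((PySem.List.pyRange 0 (PySem.List.len right.toList) 1).foldl
    (fun (st : Int × Int) i =>
      if PySem.List.pyGet? right.toList i == PySem.List.pyGet? left.toList i then
        (max st.1 (st.2 + 1), st.2 + 1)
      else
        (st.1, 0)) (0, 0)).1

-- ===== PORT B =====
-- inner 'while j < n and matches[j]: j += 1' of Source B
def pvAltRun (ms : List Bool) (n : Int) (j : Int) : Int :=
  if _h : j < n ∧ PySem.List.pyGetD ms j false = true then pvAltRun ms n (j + 1) else j
termination_by (n - j).toNat
decreasing_by omega

-- the port's outer loop cites this for termination: after a run the index strictly advances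
theorem pvAltRun_ge (ms : List Bool) (n j : Int) : j ≤ pvAltRun ms n j := by
  have main : ∀ (k : Nat) (j : Int), (n - j).toNat = k → j ≤ pvAltRun ms n j := by
    intro k
    induction k using Nat.strong_induction_on with
    | _ k ih =>
      intro j hk
      rw [pvAltRun]
      split
      · rename_i h
        have := ih (n - (j + 1)).toNat (by omega) (j + 1) rfl
        omega
      · omega
  exact main _ j rfl

theorem pvAltRun_gt (ms : List Bool) (n i : Int) (h1 : i < n)
    (h2 : PySem.List.pyGetD ms i false = true) : i < pvAltRun ms n i := by
  rw [pvAltRun, dif_pos ⟨h1, h2⟩]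
  have := pvAltRun_ge ms n (i + 1); omega

-- outer 'while i < n' of Source B
def pvAltLoop (ms : List Bool) (n : Int) (i : Int) (best : Int) : Int :=
  if h1 : i < n then
    if h2 : PySem.List.pyGetD ms i false = true then
      pvAltLoop ms n (pvAltRun ms n i)
        (if pvAltRun ms n i - i > best then pvAltRun ms n i - i else best)
    else
      pvAltLoop ms n (i + 1) best
  else best
termination_by (n - i).toNat
decreasing_by
  · have := pvAltRun_gt ms n i h1 h2; omega
  · omega

def checkSubString_alt (right : String) (left : String) : Int :=
  let ms := (PySem.List.pyRange 0 (PySem.List.len right.toList) 1).map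
    (fun i => PySem.List.pyGet? right.toList i == PySem.List.pyGet? left.toList i)
  pvAltLoop ms (PySem.List.len ms) 0 0

-- ===== PRECONDITION & SPEC =====
-- Pre_ excludes exactly the inputs where the Python A raises IndexError: len(left) < len(right).
def Pre_checkSubString (right : String) (left : String) : Prop :=
  right.toList.length ≤ left.toList.length
instance (right : String) (left : String) : Decidable (Pre_checkSubString right left) := by
  unfold Pre_checkSubString; infer_instance

def pvWitness_checkSubString : String × String := ("abc", "adc")

def Spec_checkSubString (right : String) (left : String) (out : Int) : Prop := out = checkSubString_alt right left
instance (right : String) (left : String) (out : Int) : Decidable (Spec_checkSubString right left out) := by unfold Spec_checkSubString; infer_instance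

-- ===== CLAIM (what is proved, stated in full; the proofs are below) =====
def Claim_equal_checkSubString : Prop := ∀ (right : String) (left : String), Dom_checkSubString right left → Pre_checkSubString right left → Spec_checkSubString right left (checkSubString right left)

-- ===== LEMMAS AND PROOFS =====

-- reference function: longest run of `true`, with `cnt` the length of the current open run
def pvF : Int → List Bool → Int
  | cnt, [] => cnt
  | cnt, true :: t => pvF (cnt + 1) t
  | cnt, false :: t => max cnt (pvF 0 t)

theorem pvF_ge (ms : List Bool) : ∀ cnt : Int, cnt ≤ pvF cnt ms := by
  induction ms with
  | nil => intro cnt; simp [pvF]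
  | cons b t ih =>
    intro cnt
    cases b with
    | true => have := ih (cnt + 1); simp only [pvF]; omega
    | false => simp only [pvF]; omega

theorem pvF_nonneg (ms : List Bool) : 0 ≤ pvF 0 ms := pvF_ge ms 0

-- A's loop computes `max ans (pvF cnt ms)` once `cnt ≤ ans`
theorem pvAfold_eq (ms : List Bool) :
    ∀ ans cnt : Int, 0 ≤ cnt → cnt ≤ ans →
    (ms.foldl (fun (st : Int × Int) b =>
        if b then (max st.1 (st.2 + 1), st.2 + 1) else (st.1, 0)) (ans, cnt)).1
      = max ans (pvF cnt ms) := by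
  induction ms with
  | nil => intro ans cnt h0 h; simp [pvF]; omega
  | cons b t ih =>
    intro ans cnt h0 h
    cases b with
    | true =>
      simp only [List.foldl_cons, reduceIte]
      have h1 := ih (max ans (cnt + 1)) (cnt + 1) (by omega) (by omega)
      have h2 := pvF_ge t (cnt + 1)
      simp only [pvF]
      omega
    | false =>
      simp only [List.foldl_cons, Bool.false_eq_true, reduceIte]
      have h1 := ih ans 0 (by omega) (by omega)
      have h2 := pvF_ge t 0
      simp only [pvF]
      omega

-- unrolling a run: pvF splits at the end of the leading true-run
theorem pvF_run (ms : List Bool) :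
    ∀ cnt : Int, 0 ≤ cnt →
    pvF cnt ms = max (cnt + ((ms.takeWhile id).length : Int)) (pvF 0 (ms.dropWhile id)) := by
  induction ms with
  | nil => intro cnt h; simp only [List.takeWhile_nil, List.dropWhile_nil, pvF]; simp; omega
  | cons b t ih =>
    intro cnt h
    cases b with
    | true =>
      have h1 := ih (cnt + 1) (by omega)
      simp only [pvF, List.takeWhile_cons, List.dropWhile_cons, id_eq, if_pos]
      rw [h1]
      simp only [List.length_cons]
      push_cast
      omega
    | false =>
      have h2 := pvF_ge t 0
      simp only [List.takeWhile_cons, List.dropWhile_cons, id_eq, Bool.false_eq_true,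
        if_false]
      simp only [pvF, List.length_nil]
      push_cast
      omega

theorem pv_drop_takeWhile (l : List Bool) : l.drop (l.takeWhile id).length = l.dropWhile id := by
  induction l with
  | nil => rfl
  | cons b t ih =>
    cases b with
    | true => simpa using ih
    | false => simp

theorem pv_takeWhile_le (l : List Bool) : (l.takeWhile id).length ≤ l.length :=
  (List.takeWhile_sublist _).length_le

theorem pvAltRun_eq (ms : List Bool) (i : Int) (h0 : 0 ≤ i) (h1 : i ≤ ms.length) :
    pvAltRun ms (ms.length) i = i + (((ms.drop i.toNat).takeWhile id).length : Int) := by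
  have main : ∀ (k : Nat) (i : Int), 0 ≤ i → i ≤ ms.length → (ms.length - i.toNat) = k →
      pvAltRun ms (ms.length) i = i + (((ms.drop i.toNat).takeWhile id).length : Int) := by
    intro k
    induction k using Nat.strong_induction_on with
    | _ k ih =>
      intro i h0 h1 hk
      by_cases hlt : i < (ms.length : Int)
      · have hidx : i.toNat < ms.length := by omega
        have hdrop : ms.drop i.toNat = ms[i.toNat] :: ms.drop (i.toNat + 1) :=
          List.drop_eq_getElem_cons hidx
        have hget : PySem.List.pyGetD ms i false = ms[i.toNat] :=
          PySem.List.pyGetD_eq_getElem ms false h0 (by exact_mod_cast hlt)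
        by_cases hb : ms[i.toNat] = true
        · rw [pvAltRun, dif_pos ⟨hlt, by rw [hget, hb]⟩]
          have hrec := ih (ms.length - (i + 1).toNat) (by omega) (i + 1) (by omega)
            (by omega) rfl
          rw [hrec]
          have h2 : (i + 1).toNat = i.toNat + 1 := by omega
          rw [h2, hdrop, hb, List.takeWhile_cons]
          simp only [id_eq, if_pos, List.length_cons]
          push_cast
          omega
        · rw [pvAltRun, dif_neg (by rw [hget]; simp [hb])]
          rw [hdrop, List.takeWhile_cons]
          simp [hb]
      · rw [pvAltRun, dif_neg (by omega)]
        have hnil : ms.drop i.toNat = [] := List.drop_eq_nil_of_le (by omega)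
        rw [hnil]
        simp
  exact main _ i h0 h1 rfl

-- B's outer loop computes `max best (longest run in the remaining suffix)`
theorem pvAltLoop_eq (ms : List Bool) (i best : Int) (h0 : 0 ≤ i) (h1 : i ≤ ms.length)
    (hb0 : 0 ≤ best) :
    pvAltLoop ms (ms.length) i best = max best (pvF 0 (ms.drop i.toNat)) := by
  have main : ∀ (k : Nat) (i best : Int), 0 ≤ i → i ≤ ms.length → 0 ≤ best →
      (ms.length - i.toNat) = k →
      pvAltLoop ms (ms.length) i best = max best (pvF 0 (ms.drop i.toNat)) := by
    intro k
    induction k using Nat.strong_induction_on with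
    | _ k ih =>
      intro i best h0 h1 hb0 hk
      by_cases hlt : i < (ms.length : Int)
      · have hidx : i.toNat < ms.length := by omega
        have hdrop : ms.drop i.toNat = ms[i.toNat] :: ms.drop (i.toNat + 1) :=
          List.drop_eq_getElem_cons hidx
        have hget : PySem.List.pyGetD ms i false = ms[i.toNat] :=
          PySem.List.pyGetD_eq_getElem ms false h0 (by exact_mod_cast hlt)
        by_cases hbt : ms[i.toNat] = true
        · rw [pvAltLoop, dif_pos hlt, dif_pos (by rw [hget, hbt])]
          have hrun : pvAltRun ms (ms.length) i
              = i + (((ms.drop i.toNat).takeWhile id).length : Int) :=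
            pvAltRun_eq ms i h0 h1
          set j := pvAltRun ms (ms.length) i with hj
          have htw := pv_takeWhile_le (ms.drop i.toNat)
          have hlend : (ms.drop i.toNat).length = ms.length - i.toNat := by
            rw [List.length_drop]
          have hjgt : i < j := pvAltRun_gt ms (ms.length) i hlt (by rw [hget, hbt])
          have hjle : j ≤ (ms.length : Int) := by omega
          have hdropj : ms.drop j.toNat = (ms.drop i.toNat).dropWhile id := by
            have h2 : j.toNat = i.toNat + ((ms.drop i.toNat).takeWhile id).length := by
              omega
            rw [h2, ← List.drop_drop, pv_drop_takeWhile]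
          have hrec := ih (ms.length - j.toNat) (by omega) j
            (if j - i > best then j - i else best) (by omega) hjle (by split <;> omega) rfl
          rw [hrec, hdropj]
          have hfr := pvF_run (ms.drop i.toNat) 0 (by omega)
          have hnn := pvF_nonneg ((ms.drop i.toNat).dropWhile id)
          rw [hfr]
          split <;> omega
        · rw [pvAltLoop, dif_pos hlt, dif_neg (by rw [hget]; simp [hbt])]
          have hrec := ih (ms.length - (i + 1).toNat) (by omega) (i + 1) best (by omega)
            (by omega) hb0 rfl
          rw [hrec]
          have h2 : (i + 1).toNat = i.toNat + 1 := by omega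
          rw [h2]
          have hbf : ms[i.toNat] = false := by simpa using hbt
          rw [hdrop, hbf]
          simp only [pvF]
          have := pvF_nonneg (ms.drop (i.toNat + 1))
          omega
      · rw [pvAltLoop, dif_neg (by omega)]
        have hnil : ms.drop i.toNat = [] := List.drop_eq_nil_of_le (by omega)
        rw [hnil]
        simp only [pvF]
        omega
  exact main _ i best h0 h1 hb0 rfl

-- ===== VERDICT (by name: the statement is the Claim_ definition above) =====
theorem checkSubString_spec : Claim_equal_checkSubString := by
  intro right left _ _
  unfold Spec_checkSubString
  have hB : checkSubString_alt right left =
      pvAltLoop ((PySem.List.pyRange 0 (PySem.List.len right.toList) 1).map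
          (fun i => PySem.List.pyGet? right.toList i == PySem.List.pyGet? left.toList i))
        (PySem.List.len ((PySem.List.pyRange 0 (PySem.List.len right.toList) 1).map
          (fun i => PySem.List.pyGet? right.toList i == PySem.List.pyGet? left.toList i))) 0 0 := rfl
  set ms := (PySem.List.pyRange 0 (PySem.List.len right.toList) 1).map
    (fun i => PySem.List.pyGet? right.toList i == PySem.List.pyGet? left.toList i) with hms
  have hA : checkSubString right left
      = (ms.foldl (fun (st : Int × Int) b =>
          if b then (max st.1 (st.2 + 1), st.2 + 1) else (st.1, 0)) (0, 0)).1 := by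
    unfold checkSubString
    rw [hms, List.foldl_map]
  rw [hA, hB, pvAfold_eq ms 0 0 (by omega) (by omega)]
  have hlen : PySem.List.len ms = (ms.length : Int) := PySem.List.len_eq ms
  rw [hlen, pvAltLoop_eq ms 0 0 (by omega) (by omega) (by omega)]
  simp
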